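-- pv_equiv track=rewrite | github.com/edrumm/HackerRank-Challenges | algorithms/implementation/ElectronicsShop.py | get_money_spend
-- ===== SOURCE A (Python) =====
-- def get_money_spend(keyboards, drives, b):
--     highest = min(keyboards) + min(drives)
--
--     if highest > b:
--         return -1
--
--     for kprice in keyboards:
--         for dprice in drives:
--             total = kprice + dprice
--
--             if total > highest and total <= b:
--                 highest = total
--
--     return highest
-- ===== SOURCE B (Python) =====
-- def get_money_spend(keyboards, drives, b):
--     ds = sorted(drives)
--     best = None
--     for kprice in keyboards:
--         limit = b - kprice
--         lo, hi = 0, len(ds)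
--         while lo < hi:
--             mid = (lo + hi) // 2
--             if ds[mid] <= limit:
--                 lo = mid + 1
--             else:
--                 hi = mid
--         if lo > 0:
--             total = kprice + ds[lo - 1]
--             if best is None or total > best:
--                 best = total
--     return -1 if best is None else best
-- ===== Notes on version B (the rewrite author's own statement) =====
-- stated objective: faster
-- what changed: Replaces the nested scan over all keyboard/drive pairs by sorting the drives once and, per keyboard, binary-searching the largest affordable drive; tracks the best as an Optional instead of seeding with min+min.
import Mathlib
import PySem

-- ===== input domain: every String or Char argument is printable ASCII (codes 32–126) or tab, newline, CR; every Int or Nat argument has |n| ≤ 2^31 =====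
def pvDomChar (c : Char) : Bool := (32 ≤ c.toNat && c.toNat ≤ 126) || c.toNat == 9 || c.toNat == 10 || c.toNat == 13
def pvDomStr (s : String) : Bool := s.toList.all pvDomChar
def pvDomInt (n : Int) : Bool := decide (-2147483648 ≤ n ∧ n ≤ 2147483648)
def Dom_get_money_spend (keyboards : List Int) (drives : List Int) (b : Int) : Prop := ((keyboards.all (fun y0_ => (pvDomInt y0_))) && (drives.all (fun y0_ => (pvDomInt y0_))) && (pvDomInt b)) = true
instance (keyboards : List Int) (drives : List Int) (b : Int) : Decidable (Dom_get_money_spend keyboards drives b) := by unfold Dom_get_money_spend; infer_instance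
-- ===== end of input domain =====

-- B replaces A's nested scan over all pairs by sorting the drives once and binary-searching,
-- per keyboard, the largest drive fitting the remaining budget (objective: faster).

-- ===== PORT A =====
def get_money_spend (keyboards : List Int) (drives : List Int) (b : Int) : Int :=
  -- min(keyboards), min(drives): Python raises ValueError on an empty list; excluded by Pre_
  match PySem.List.min? keyboards (fun x => x), PySem.List.min? drives (fun x => x) with
  | some mk, some md =>
    if mk + md > b then -1
    else
      keyboards.foldl (fun highest kprice =>
        drives.foldl (fun highest dprice =>
          if kprice + dprice > highest ∧ kprice + dprice ≤ b then kprice + dprice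
          else highest) highest) (mk + md)
  | _, _ => 0

-- ===== PORT B =====
-- the hand-written binary-search loop of Source B: rightmost insertion point of `limit` in ds[lo:hi]
def pvBsearch (ds : List Int) (limit : Int) (lo hi : Nat) : Nat :=
  if lo < hi then
    let mid := (lo + hi) / 2          -- exact: lo,hi ≥ 0, Nat / = Python //
    if ds.getD mid 0 ≤ limit then     -- ds[mid]: mid < hi ≤ len ds, in range, so getD is exact
      pvBsearch ds limit (mid + 1) hi
    else
      pvBsearch ds limit lo mid
  else lo
termination_by hi - lo
decreasing_by all_goals omega

-- body of Source B's `for kprice in keyboards` loop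
def pvBestStep (ds : List Int) (b : Int) (best : Option Int) (kprice : Int) : Option Int :=
  let lo := pvBsearch ds (b - kprice) 0 ds.length
  if 0 < lo then
    let total := kprice + ds.getD (lo - 1) 0   -- ds[lo-1]: 0 < lo ≤ len ds, in range
    match best with
    | none => some total
    | some v => if total > v then some total else best
  else best

def get_money_spend_alt (keyboards : List Int) (drives : List Int) (b : Int) : Int :=
  let ds := PySem.List.sorted drives (fun x => x) false
  match keyboards.foldl (pvBestStep ds b) (none : Option Int) with
  | none => -1
  | some v => v

-- ===== PRECONDITION & SPEC =====
-- Pre_ excludes exactly the inputs on which A raises ValueError (min() of an empty list).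
def Pre_get_money_spend (keyboards : List Int) (drives : List Int) (b : Int) : Prop :=
  keyboards ≠ [] ∧ drives ≠ []
instance (keyboards : List Int) (drives : List Int) (b : Int) : Decidable (Pre_get_money_spend keyboards drives b) := by unfold Pre_get_money_spend; infer_instance

def pvWitness_get_money_spend : List Int × List Int × Int := ([3, 1], [5, 2], 6)


def Spec_get_money_spend (keyboards : List Int) (drives : List Int) (b : Int) (out : Int) : Prop := out = get_money_spend_alt keyboards drives b
instance (keyboards : List Int) (drives : List Int) (b : Int) (out : Int) : Decidable (Spec_get_money_spend keyboards drives b out) := by unfold Spec_get_money_spend; infer_instance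

-- ===== CLAIM (what is proved, stated in full; the proofs are below) =====
def Claim_equal_get_money_spend : Prop := ∀ (keyboards : List Int) (drives : List Int) (b : Int), Dom_get_money_spend keyboards drives b → Pre_get_money_spend keyboards drives b → Spec_get_money_spend keyboards drives b (get_money_spend keyboards drives b)


-- ===== LEMMAS AND PROOFS =====

-- A's inner loop: a running max over values f v that stay ≤ b
lemma pv_foldl_climb {α : Type} (b : Int) (f : α → Int) :
    ∀ (vs : List α) (h R : Int),
      R = vs.foldl (fun h2 v => if f v > h2 ∧ f v ≤ b then f v else h2) h →
      h ≤ R ∧ (R = h ∨ ∃ v ∈ vs, R = f v ∧ R ≤ b) ∧ (∀ v ∈ vs, f v ≤ b → f v ≤ R) := by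
  intro vs
  induction vs with
  | nil => intro h R hR; simp at hR; subst hR; simp
  | cons v t ih =>
    intro h R hR
    simp only [List.foldl_cons] at hR
    by_cases hc : f v > h ∧ f v ≤ b
    · rw [if_pos hc] at hR
      obtain ⟨h1, h2, h3⟩ := ih (f v) R hR
      refine ⟨by omega, ?_, ?_⟩
      · rcases h2 with h2 | ⟨w, hw, hwe, hwb⟩
        · exact Or.inr ⟨v, by simp, by omega⟩
        · exact Or.inr ⟨w, by simp [hw], hwe, hwb⟩
      · intro w hw hwb
        rcases List.mem_cons.mp hw with rfl | hw'
        · omega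
        · exact h3 w hw' hwb
    · rw [if_neg hc] at hR
      obtain ⟨h1, h2, h3⟩ := ih h R hR
      refine ⟨h1, ?_, ?_⟩
      · rcases h2 with h2 | ⟨w, hw, hwe, hwb⟩
        · exact Or.inl h2
        · exact Or.inr ⟨w, by simp [hw], hwe, hwb⟩
      · intro w hw hwb
        rcases List.mem_cons.mp hw with rfl | hw'
        · omega
        · exact h3 w hw' hwb

-- A's double loop, characterized
lemma pv_A_outer (b : Int) (drives : List Int) :
    ∀ (ks : List Int) (h R : Int),
      R = ks.foldl (fun highest kprice =>
            drives.foldl (fun highest dprice =>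
              if kprice + dprice > highest ∧ kprice + dprice ≤ b then kprice + dprice
              else highest) highest) h →
      h ≤ R ∧ (R = h ∨ ∃ k ∈ ks, ∃ d ∈ drives, R = k + d ∧ R ≤ b) ∧
        (∀ k ∈ ks, ∀ d ∈ drives, k + d ≤ b → k + d ≤ R) := by
  intro ks
  induction ks with
  | nil => intro h R hR; simp at hR; subst hR; simp
  | cons k t ih =>
    intro h R hR
    simp only [List.foldl_cons] at hR
    set h' := drives.foldl (fun highest dprice =>
      if k + dprice > highest ∧ k + dprice ≤ b then k + dprice else highest) h with hh'
    obtain ⟨i1, i2, i3⟩ := pv_foldl_climb b (fun d => k + d) drives h h' hh'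
    obtain ⟨j1, j2, j3⟩ := ih h' R hR
    refine ⟨by omega, ?_, ?_⟩
    · rcases j2 with rfl | ⟨k', hk', d', hd', he, hb'⟩
      · rcases i2 with h2 | ⟨d, hd, he, hb'⟩
        · exact Or.inl h2
        · exact Or.inr ⟨k, by simp, d, hd, he, hb'⟩
      · exact Or.inr ⟨k', by simp [hk'], d', hd', he, hb'⟩
    · intro k' hk' d hd hdb
      rcases List.mem_cons.mp hk' with rfl | hk''
      · exact le_trans (i3 d hd hdb) j1
      · exact j3 k' hk'' d hd hdb

-- the binary search on a (weakly) index-monotone list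
lemma pv_bsearch_char (ds : List Int) (limit : Int)
    (hmono : ∀ p q : Nat, p ≤ q → q < ds.length → ds.getD p 0 ≤ ds.getD q 0) :
    ∀ (n lo hi : Nat), hi - lo = n → lo ≤ hi → hi ≤ ds.length →
      (∀ i < lo, ds.getD i 0 ≤ limit) →
      (∀ i, hi ≤ i → i < ds.length → limit < ds.getD i 0) →
      pvBsearch ds limit lo hi ≤ ds.length ∧
      (∀ i < pvBsearch ds limit lo hi, ds.getD i 0 ≤ limit) ∧
      (∀ i, pvBsearch ds limit lo hi ≤ i → i < ds.length → limit < ds.getD i 0) := by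
  intro n
  induction n using Nat.strong_induction_on with
  | _ n ih =>
    intro lo hi hn hlohi hhile hL hR
    rw [pvBsearch]
    by_cases hlt : lo < hi
    · rw [if_pos hlt]
      set mid := (lo + hi) / 2 with hmid
      have hmlo : lo ≤ mid := by omega
      have hmhi : mid < hi := by omega
      have hmlen : mid < ds.length := by omega
      by_cases hc : ds.getD mid 0 ≤ limit
      · rw [if_pos hc]
        exact ih (hi - (mid + 1)) (by omega) (mid + 1) hi rfl (by omega) hhile
          (fun i hi' => le_trans (hmono i mid (by omega) hmlen) hc) hR
      · rw [if_neg hc]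
        exact ih (mid - lo) (by omega) lo mid rfl (by omega) (by omega) hL
          (fun i hmi hilen => lt_of_lt_of_le (by omega) (hmono mid i hmi hilen))
    · rw [if_neg hlt]
      have : lo = hi := by omega
      subst this
      exact ⟨by omega, hL, hR⟩


-- the sorted drive list is index-monotone (getD form)
lemma pv_sorted_mono (drives : List Int) :
    ∀ p q : Nat, p ≤ q → q < (PySem.List.sorted drives (fun x => x) false).length →
      (PySem.List.sorted drives (fun x => x) false).getD p 0 ≤
      (PySem.List.sorted drives (fun x => x) false).getD q 0 := by
  intro p q hpq hq
  rw [List.getD_eq_getElem _ _ (by omega), List.getD_eq_getElem _ _ hq]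
  exact PySem.List.sorted_id_getElem_mono drives hpq hq

-- what Source B's binary search finds for one keyboard price k
lemma pv_step_char (drives : List Int) (b k : Int) :
    (0 < pvBsearch (PySem.List.sorted drives (fun x => x) false) (b - k) 0
        (PySem.List.sorted drives (fun x => x) false).length →
      (k + (PySem.List.sorted drives (fun x => x) false).getD
          (pvBsearch (PySem.List.sorted drives (fun x => x) false) (b - k) 0
            (PySem.List.sorted drives (fun x => x) false).length - 1) 0 ≤ b ∧
       (∃ d ∈ drives, (PySem.List.sorted drives (fun x => x) false).getD
          (pvBsearch (PySem.List.sorted drives (fun x => x) false) (b - k) 0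
            (PySem.List.sorted drives (fun x => x) false).length - 1) 0 = d) ∧
       ∀ d ∈ drives, k + d ≤ b →
         d ≤ (PySem.List.sorted drives (fun x => x) false).getD
          (pvBsearch (PySem.List.sorted drives (fun x => x) false) (b - k) 0
            (PySem.List.sorted drives (fun x => x) false).length - 1) 0)) ∧
    (pvBsearch (PySem.List.sorted drives (fun x => x) false) (b - k) 0
        (PySem.List.sorted drives (fun x => x) false).length = 0 →
      ∀ d ∈ drives, b < k + d) := by
  set ds := PySem.List.sorted drives (fun x => x) false with hds
  obtain ⟨hle, hLall, hRall⟩ :=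
    pv_bsearch_char ds (b - k) (pv_sorted_mono drives) ds.length 0 ds.length (by omega)
      (by omega) le_rfl (by omega) (by omega)
  set r := pvBsearch ds (b - k) 0 ds.length with hr
  constructor
  · intro hpos
    have hrlen : r - 1 < ds.length := by omega
    have hval : ds.getD (r - 1) 0 ≤ b - k := hLall (r - 1) (by omega)
    refine ⟨by omega, ?_, ?_⟩
    · refine ⟨ds.getD (r - 1) 0, ?_, rfl⟩
      rw [← PySem.List.mem_sorted drives (fun x => x) false, ← hds]
      rw [List.getD_eq_getElem _ _ hrlen]
      exact List.getElem_mem hrlen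
    · intro d hd hdb
      have hd' : d ∈ ds := by
        rw [hds, PySem.List.mem_sorted]; exact hd
      obtain ⟨i, hilen, hie⟩ := List.mem_iff_getElem.mp hd'
      by_cases hi : i < r
      · have := pv_sorted_mono drives i (r - 1) (by omega) hrlen
        rw [← hds] at this
        rw [List.getD_eq_getElem _ _ hilen, hie] at this
        exact this
      · have := hRall i (by omega) hilen
        rw [List.getD_eq_getElem _ _ hilen, hie] at this
        omega
  · intro h0 d hd
    have hd' : d ∈ ds := by
      rw [hds, PySem.List.mem_sorted]; exact hd
    obtain ⟨i, hilen, hie⟩ := List.mem_iff_getElem.mp hd'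
    have := hRall i (by omega) hilen
    rw [List.getD_eq_getElem _ _ hilen, hie] at this
    omega

-- B's loop, characterized (acc-generalized)
lemma pv_B_fold (drives : List Int) (b : Int) :
    ∀ (ks : List Int) (acc R : Option Int),
      R = ks.foldl (pvBestStep (PySem.List.sorted drives (fun x => x) false) b) acc →
      (R = none → acc = none ∧ ∀ k ∈ ks, ∀ d ∈ drives, b < k + d) ∧
      (∀ v, R = some v →
        (acc = some v ∨ ∃ k ∈ ks, ∃ d ∈ drives, v = k + d ∧ v ≤ b) ∧
        (∀ w, acc = some w → w ≤ v) ∧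
        (∀ k ∈ ks, ∀ d ∈ drives, k + d ≤ b → k + d ≤ v)) := by
  set ds := PySem.List.sorted drives (fun x => x) false with hds
  intro ks
  induction ks with
  | nil =>
    intro acc R hR
    simp only [List.foldl_nil] at hR
    subst hR
    exact ⟨fun h => ⟨h, by simp⟩, fun v hv => ⟨Or.inl hv, fun w hw => by
      rw [hv] at hw; exact le_of_eq (Option.some.inj hw).symm, by simp⟩⟩
  | cons k t ih =>
    intro acc R hR
    simp only [List.foldl_cons] at hR
    obtain ⟨ihn, ihs⟩ := ih (pvBestStep ds b acc k) R hR
    obtain ⟨s1, s2⟩ := pv_step_char drives b k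
    rw [← hds] at s1 s2
    by_cases hr : 0 < pvBsearch ds (b - k) 0 ds.length
    · obtain ⟨htb, ⟨d0, hd0, hd0e⟩, hmax⟩ := s1 hr
      set tv := ds.getD (pvBsearch ds (b - k) 0 ds.length - 1) 0 with htv
      cases acc with
      | none =>
        have hacc' : pvBestStep ds b none k = some (k + tv) := by
          simp only [pvBestStep]; rw [if_pos hr]
        rw [hacc'] at ihn ihs
        constructor
        · intro hRn
          exact absurd (ihn hRn).1 (by simp)
        · intro v hv
          obtain ⟨hv1, hv2, hv3⟩ := ihs v hv
          have hkv : k + tv ≤ v := hv2 (k + tv) rfl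
          refine ⟨?_, ?_, ?_⟩
          · rcases hv1 with he | ⟨k', hk', d', hd', he, hb'⟩
            · exact Or.inr ⟨k, by simp, d0, hd0, by
                rw [(Option.some.inj he).symm, hd0e], by
                rw [(Option.some.inj he).symm]; exact htb⟩
            · exact Or.inr ⟨k', by simp [hk'], d', hd', he, hb'⟩
          · intro w hw; exact absurd hw (by simp)
          · intro k' hk' d hd hdb
            rcases List.mem_cons.mp hk' with rfl | hk''
            · have := hmax d hd hdb; omega
            · exact hv3 k' hk'' d hd hdb
      | some w =>
        by_cases hgt : k + tv > w
        · have hacc' : pvBestStep ds b (some w) k = some (k + tv) := by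
            simp only [pvBestStep]; rw [if_pos hr, if_pos hgt]
          rw [hacc'] at ihn ihs
          constructor
          · intro hRn
            exact absurd (ihn hRn).1 (by simp)
          · intro v hv
            obtain ⟨hv1, hv2, hv3⟩ := ihs v hv
            have hkv : k + tv ≤ v := hv2 (k + tv) rfl
            refine ⟨?_, ?_, ?_⟩
            · rcases hv1 with he | ⟨k', hk', d', hd', he, hb'⟩
              · exact Or.inr ⟨k, by simp, d0, hd0, by
                  rw [(Option.some.inj he).symm, hd0e], by
                  rw [(Option.some.inj he).symm]; exact htb⟩
              · exact Or.inr ⟨k', by simp [hk'], d', hd', he, hb'⟩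
            · intro w' hw'
              have : w' = w := (Option.some.inj hw').symm
              omega
            · intro k' hk' d hd hdb
              rcases List.mem_cons.mp hk' with rfl | hk''
              · have := hmax d hd hdb; omega
              · exact hv3 k' hk'' d hd hdb
        · have hacc' : pvBestStep ds b (some w) k = some w := by
            simp only [pvBestStep]; rw [if_pos hr, if_neg hgt]
          rw [hacc'] at ihn ihs
          constructor
          · intro hRn
            exact absurd (ihn hRn).1 (by simp)
          · intro v hv
            obtain ⟨hv1, hv2, hv3⟩ := ihs v hv
            have hwv : w ≤ v := hv2 w rfl
            refine ⟨?_, ?_, ?_⟩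
            · rcases hv1 with he | ⟨k', hk', d', hd', he, hb'⟩
              · exact Or.inl he
              · exact Or.inr ⟨k', by simp [hk'], d', hd', he, hb'⟩
            · intro w' hw'
              have : w' = w := (Option.some.inj hw').symm
              omega
            · intro k' hk' d hd hdb
              rcases List.mem_cons.mp hk' with rfl | hk''
              · have := hmax d hd hdb; omega
              · exact hv3 k' hk'' d hd hdb
    · have hr0 : pvBsearch ds (b - k) 0 ds.length = 0 := by omega
      have hnop := s2 hr0
      have hacc' : pvBestStep ds b acc k = acc := by
        simp only [pvBestStep]; rw [if_neg hr]
      rw [hacc'] at ihn ihs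
      constructor
      · intro hRn
        obtain ⟨h1, h2⟩ := ihn hRn
        refine ⟨h1, ?_⟩
        intro k' hk' d hd
        rcases List.mem_cons.mp hk' with rfl | hk''
        · exact hnop d hd
        · exact h2 k' hk'' d hd
      · intro v hv
        obtain ⟨hv1, hv2, hv3⟩ := ihs v hv
        refine ⟨?_, hv2, ?_⟩
        · rcases hv1 with he | ⟨k', hk', d', hd', he, hb'⟩
          · exact Or.inl he
          · exact Or.inr ⟨k', by simp [hk'], d', hd', he, hb'⟩
        · intro k' hk' d hd hdb
          rcases List.mem_cons.mp hk' with rfl | hk''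
          · exact absurd hdb (by have := hnop d hd; omega)
          · exact hv3 k' hk'' d hd hdb

-- ===== VERDICT (by name: the statement is the Claim_ definition above) =====
theorem get_money_spend_spec : Claim_equal_get_money_spend := by
  intro keyboards drives b _ hpre
  obtain ⟨hk, hd⟩ := hpre
  unfold Spec_get_money_spend
  obtain ⟨mk, hmk⟩ : ∃ mk, PySem.List.min? keyboards (fun x => x) = some mk := by
    cases h : PySem.List.min? keyboards (fun x => x) with
    | none => exact absurd ((PySem.List.min?_eq_none_iff _ _).mp h) hk
    | some m => exact ⟨m, rfl⟩
  obtain ⟨md, hmd⟩ : ∃ md, PySem.List.min? drives (fun x => x) = some md := by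
    cases h : PySem.List.min? drives (fun x => x) with
    | none => exact absurd ((PySem.List.min?_eq_none_iff _ _).mp h) hd
    | some m => exact ⟨m, rfl⟩
  have hmkmem := PySem.List.min?_mem hmk
  have hmdmem := PySem.List.min?_mem hmd
  have hmkmin : ∀ y ∈ keyboards, mk ≤ y := PySem.List.min?_isMin hmk
  have hmdmin : ∀ y ∈ drives, md ≤ y := PySem.List.min?_isMin hmd
  obtain ⟨bn, bs⟩ := pv_B_fold drives b keyboards none _ rfl
  simp only [get_money_spend, hmk, hmd]
  by_cases hgt : mk + md > b
  · rw [if_pos hgt]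
    simp only [get_money_spend_alt]
    cases hcase : keyboards.foldl
        (pvBestStep (PySem.List.sorted drives (fun x => x) false) b) (none : Option Int) with
    | none => rfl
    | some v =>
      obtain ⟨hv1, _, _⟩ := bs v hcase
      rcases hv1 with he | ⟨k, hkm, d, hdm, he, hb'⟩
      · exact absurd he (by simp)
      · exfalso
        have h1 := hmkmin k hkm
        have h2 := hmdmin d hdm
        omega
  · rw [if_neg hgt]
    have hle : mk + md ≤ b := by omega
    obtain ⟨ha1, ha2, ha3⟩ := pv_A_outer b drives keyboards (mk + md) _ rfl
    simp only [get_money_spend_alt]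
    cases hcase : keyboards.foldl
        (pvBestStep (PySem.List.sorted drives (fun x => x) false) b) (none : Option Int) with
    | none =>
      exfalso
      obtain ⟨_, hnop⟩ := bn hcase
      have := hnop mk hmkmem md hmdmem
      omega
    | some v =>
      obtain ⟨hv1, hv2, hv3⟩ := bs v hcase
      have hvpair : ∃ k ∈ keyboards, ∃ d ∈ drives, v = k + d ∧ v ≤ b := by
        rcases hv1 with he | h
        · exact absurd he (by simp)
        · exact h
      obtain ⟨k, hkm, d, hdm, hve, hvb⟩ := hvpair
      have h1 : keyboards.foldl (fun highest kprice =>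
          drives.foldl (fun highest dprice =>
            if kprice + dprice > highest ∧ kprice + dprice ≤ b then kprice + dprice
            else highest) highest) (mk + md) ≤ v := by
        rcases ha2 with he | ⟨k', hk', d', hd', he, hb'⟩
        · rw [he]; exact hv3 mk hmkmem md hmdmem hle
        · rw [he]; exact hv3 k' hk' d' hd' (he ▸ hb')
      have h2 : v ≤ keyboards.foldl (fun highest kprice =>
          drives.foldl (fun highest dprice =>
            if kprice + dprice > highest ∧ kprice + dprice ≤ b then kprice + dprice
            else highest) highest) (mk + md) := by
        rw [hve]
        exact ha3 k hkm d hdm (hve ▸ hvb)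
      change _ = v
      omega
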